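-- pv_equiv track=rewrite | github.com/keerths7/DSA | Arrays/Max_Min_Array.py | find_min_max_initial_comparision_builtinminmax
-- ===== SOURCE A (Python) =====
-- def find_min_max_initial_comparision_builtinminmax(arr):
--     if len(arr) % 2 == 0:
--         if arr[0] > arr[1]:
--             maxx = arr[0]
--             minn = arr[1]
--         else:
--             maxx = arr[1]
--             minn = arr[0]
--         i = 2
--
--     else:
--         minn = maxx = arr[0]
--         i = 1
--
--     while i < len(arr):
--         if arr[i] > arr[i+1]:
--             maxx = max(maxx, arr[i])
--             minn = min(minn, arr[i+1])
--         else: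
--             maxx = max(maxx, arr[i+1])
--             minn = min(minn, arr[i])
--         i += 2
--     return (minn, maxx)
-- ===== SOURCE B (Python) =====
-- def find_min_max_initial_comparision_builtinminmax(arr):
--     minn = maxx = arr[0]
--     for x in arr[1:]:
--         if x < minn:
--             minn = x
--         elif x > maxx:
--             maxx = x
--     return (minn, maxx)
-- ===== Notes on version B (the rewrite author's own statement) =====
-- stated objective: simpler
-- what changed: Replaces the even/odd parity setup and two-at-a-time pairwise comparison loop with a plain single-pass scan that starts from arr[0] and updates min/max element by element (fewer comparisons/calls per element in practice).
-- outside the precondition, e.g. on find_min_max_initial_comparision_builtinminmax([]): A raises IndexError, B raises IndexError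
import Mathlib
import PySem

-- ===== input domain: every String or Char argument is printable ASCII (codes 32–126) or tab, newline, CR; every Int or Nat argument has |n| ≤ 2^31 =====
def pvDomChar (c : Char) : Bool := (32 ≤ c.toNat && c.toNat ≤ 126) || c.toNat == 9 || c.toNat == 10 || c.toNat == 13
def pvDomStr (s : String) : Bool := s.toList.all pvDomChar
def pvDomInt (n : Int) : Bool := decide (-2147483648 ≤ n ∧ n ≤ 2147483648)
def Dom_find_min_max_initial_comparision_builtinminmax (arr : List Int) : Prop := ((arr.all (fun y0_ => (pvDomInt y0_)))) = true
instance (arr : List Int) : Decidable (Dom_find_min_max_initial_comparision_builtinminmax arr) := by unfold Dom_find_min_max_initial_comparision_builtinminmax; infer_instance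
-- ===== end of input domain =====

-- B replaces A's parity setup and two-at-a-time pairwise loop with a plain single-pass min/max scan (objective: simpler).


-- ===== PORT A =====
-- A's while loop: i steps by 2, reads arr[i] and arr[i+1]. Under Pre_ (arr ≠ [])
-- every index read is in range, so getD's default 0 is never the value used.
def pvLoopA (arr : List Int) (i : Nat) (minn maxx : Int) : Int × Int :=
  if i < arr.length then
    let a := arr.getD i 0
    let b := arr.getD (i+1) 0
    if a > b then pvLoopA arr (i+2) (min minn b) (max maxx a)
    else pvLoopA arr (i+2) (min minn a) (max maxx b)
  else (minn, maxx)
termination_by arr.length - i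
decreasing_by all_goals omega

def find_min_max_initial_comparision_builtinminmax (arr : List Int) : Int × Int :=
  if arr.length % 2 == 0 then
    let a0 := arr.getD 0 0
    let a1 := arr.getD 1 0
    if a0 > a1 then pvLoopA arr 2 a1 a0
    else pvLoopA arr 2 a0 a1
  else
    pvLoopA arr 1 (arr.getD 0 0) (arr.getD 0 0)

-- ===== PORT B =====
-- B's for-loop over arr[1:], updating minn/maxx element by element.
def pvLoopB (xs : List Int) (minn maxx : Int) : Int × Int :=
  match xs with
  | [] => (minn, maxx)
  | x :: rest =>
    if x < minn then pvLoopB rest x maxx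
    else if x > maxx then pvLoopB rest minn x
    else pvLoopB rest minn maxx

def find_min_max_initial_comparision_builtinminmax_alt (arr : List Int) : Int × Int :=
  match arr with
  | [] => (0, 0)  -- unreachable under Pre_ (Python raises IndexError on arr[0])
  | a0 :: rest => pvLoopB rest a0 a0

-- ===== PRECONDITION & SPEC =====
-- Pre_ excludes only the empty list, on which A raises IndexError (arr[0]).
def Pre_find_min_max_initial_comparision_builtinminmax (arr : List Int) : Prop := arr ≠ []
instance (arr : List Int) : Decidable (Pre_find_min_max_initial_comparision_builtinminmax arr) := by unfold Pre_find_min_max_initial_comparision_builtinminmax; infer_instance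
def pvWitness_find_min_max_initial_comparision_builtinminmax : List Int := [3, -1, 4, 1, 5]

def Spec_find_min_max_initial_comparision_builtinminmax (arr : List Int) (out : Int × Int) : Prop := out = find_min_max_initial_comparision_builtinminmax_alt arr
instance (arr : List Int) (out : Int × Int) : Decidable (Spec_find_min_max_initial_comparision_builtinminmax arr out) := by unfold Spec_find_min_max_initial_comparision_builtinminmax; infer_instance

-- ===== CLAIM (what is proved, stated in full; the proofs are below) =====
def Claim_equal_find_min_max_initial_comparision_builtinminmax : Prop := ∀ (arr : List Int), Dom_find_min_max_initial_comparision_builtinminmax arr → Pre_find_min_max_initial_comparision_builtinminmax arr → Spec_find_min_max_initial_comparision_builtinminmax arr (find_min_max_initial_comparision_builtinminmax arr)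

-- ===== LEMMAS AND PROOFS =====

-- B's guarded loop equals the pair of foldl min / foldl max, given minn ≤ maxx.
theorem pvLoopB_eq (xs : List Int) : ∀ (minn maxx : Int), minn ≤ maxx →
    pvLoopB xs minn maxx = (xs.foldl min minn, xs.foldl max maxx) := by
  induction xs with
  | nil => intro minn maxx h; simp [pvLoopB]
  | cons x rest ih =>
    intro minn maxx h
    simp only [pvLoopB, List.foldl_cons]
    split_ifs with h1 h2
    · rw [ih x maxx (by omega)]
      congr 1 <;> congr 1 <;> omega
    · rw [ih minn x (by omega)]
      congr 1 <;> congr 1 <;> omega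
    · rw [ih minn maxx h]
      congr 1 <;> congr 1 <;> omega

-- A's pairwise loop equals the same foldls over the suffix, provided the
-- remaining length is even.
theorem pvLoopA_eq (arr : List Int) : ∀ (n i : Nat) (minn maxx : Int),
    arr.length - i = n → (arr.length - i) % 2 = 0 →
    pvLoopA arr i minn maxx = ((arr.drop i).foldl min minn, (arr.drop i).foldl max maxx) := by
  intro n
  induction n using Nat.strong_induction_on with
  | _ n ih =>
    intro i minn maxx hn hev
    rw [pvLoopA]
    by_cases hi : i < arr.length
    · have hi1 : i + 1 < arr.length := by omega
      simp only [hi, if_pos]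
      have hd : arr.drop i = arr[i] :: arr.drop (i+1) := List.drop_eq_getElem_cons hi
      have hd1 : arr.drop (i+1) = arr[i+1] :: arr.drop (i+2) := List.drop_eq_getElem_cons hi1
      have ga : arr.getD i 0 = arr[i] := List.getD_eq_getElem arr 0 hi
      have gb : arr.getD (i+1) 0 = arr[i+1] := List.getD_eq_getElem arr 0 hi1
      rw [hd, hd1]
      simp only [ga, gb, List.foldl_cons]
      have hrec := ih (arr.length - (i+2)) (by omega) (i+2) 
      split_ifs with hab
      · rw [hrec (min minn arr[i+1]) (max maxx arr[i]) rfl (by omega)]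
        congr 2 <;> omega
      · rw [hrec (min minn arr[i]) (max maxx arr[i+1]) rfl (by omega)]
        congr 2 <;> omega
    · simp only [hi, ite_false]
      rw [List.drop_of_length_le (by omega)]
      simp

-- ===== VERDICT (by name: the statement is the Claim_ definition above) =====
theorem find_min_max_initial_comparision_builtinminmax_spec : Claim_equal_find_min_max_initial_comparision_builtinminmax := by
  intro arr _ hpre
  unfold Spec_find_min_max_initial_comparision_builtinminmax
  match arr with
  | [] => exact absurd rfl hpre
  | a0 :: rest =>
    unfold find_min_max_initial_comparision_builtinminmax find_min_max_initial_comparision_builtinminmax_alt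
    by_cases hev : (a0 :: rest).length % 2 = 0
    · -- even length: rest = a1 :: rest'
      match rest with
      | [] => simp at hev
      | a1 :: rest' =>
        have hlen : (a0 :: a1 :: rest').length = rest'.length + 2 := by simp
        have hev2 : ((a0 :: a1 :: rest').length - 2) % 2 = 0 := by omega
        simp only [hev, beq_iff_eq, if_pos, List.getD_cons_zero, List.getD_cons_succ]
        rw [pvLoopB_eq _ a0 a0 le_rfl]
        simp only [List.foldl_cons]
        have hdrop : (a0 :: a1 :: rest').drop 2 = rest' := rfl
        split_ifs with h01
        · rw [pvLoopA_eq _ _ 2 a1 a0 rfl hev2, hdrop]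
          congr 2 <;> omega
        · rw [pvLoopA_eq _ _ 2 a0 a1 rfl hev2, hdrop]
          congr 2 <;> omega
    · -- odd length
      have hev1 : ((a0 :: rest).length - 1) % 2 = 0 := by
        simp at hev ⊢; omega
      simp only [beq_iff_eq, hev, ite_false, List.getD_cons_zero]
      rw [pvLoopA_eq _ _ 1 a0 a0 rfl hev1]
      rw [pvLoopB_eq _ a0 a0 le_rfl]
      rfl
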